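-- pv_equiv track=rewrite | github.com/zengzilin/ai-ops | ai_ops/app/services/prom_client.py | optimize_queries
-- ===== SOURCE A (Python) =====
-- from typing import Dict, Any, List, Optional
-- from collections import defaultdict
--
-- def optimize_queries(queries: List[str]) -> List[str]:
--     """优化查询语句，合并相似的查询"""
--     # 按指标类型分组
--     query_groups = defaultdict(list)
--
--     for query in queries:
--         # 提取指标名称（简化处理）
--         if 'node_cpu_seconds_total' in query:
--             query_groups['cpu'].append(query)
--         elif 'node_memory' in query:
--             query_groups['memory'].append(query)
--         elif 'node_filesystem' in query:
--             query_groups['filesystem'].append(query)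
--         elif 'node_network' in query:
--             query_groups['network'].append(query)
--         else:
--             query_groups['other'].append(query)
--
--     # 尝试合并相似查询
--     optimized_queries = []
--
--     # CPU 查询不合并，保持逐实例/逐表达式的查询，以保证后续按查询字符串映射解析
--     if 'cpu' in query_groups:
--         optimized_queries.extend(query_groups['cpu'])
--
--     # 内存相关查询
--     if 'memory' in query_groups:
--         optimized_queries.extend(query_groups['memory'])
--
--     # 文件系统相关查询
--     if 'filesystem' in query_groups:
--         optimized_queries.extend(query_groups['filesystem'])
--
--     # 网络相关查询
--     if 'network' in query_groups:
--         optimized_queries.extend(query_groups['network'])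
--
--     # 其他查询
--     if 'other' in query_groups:
--         optimized_queries.extend(query_groups['other'])
--
--     return optimized_queries
-- ===== SOURCE B (Python) =====
-- def _classify(query):
--     if 'node_cpu_seconds_total' in query:
--         return 'cpu'
--     if 'node_memory' in query:
--         return 'memory'
--     if 'node_filesystem' in query:
--         return 'filesystem'
--     if 'node_network' in query:
--         return 'network'
--     return 'other'
--
-- _CATEGORY_ORDER = ['cpu', 'memory', 'filesystem', 'network', 'other']
--
-- def optimize_queries(queries):
--     return [q for cat in _CATEGORY_ORDER for q in queries if _classify(q) == cat]
-- ===== Notes on version B (the rewrite author's own statement) =====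
-- stated objective: simpler
-- what changed: Replaces the defaultdict bucketing pass plus per-key extend/contains logic with a pure classifier and one flat comprehension over the fixed category order, filtering the input once per category; no dict of buckets is built.
import Mathlib
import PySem

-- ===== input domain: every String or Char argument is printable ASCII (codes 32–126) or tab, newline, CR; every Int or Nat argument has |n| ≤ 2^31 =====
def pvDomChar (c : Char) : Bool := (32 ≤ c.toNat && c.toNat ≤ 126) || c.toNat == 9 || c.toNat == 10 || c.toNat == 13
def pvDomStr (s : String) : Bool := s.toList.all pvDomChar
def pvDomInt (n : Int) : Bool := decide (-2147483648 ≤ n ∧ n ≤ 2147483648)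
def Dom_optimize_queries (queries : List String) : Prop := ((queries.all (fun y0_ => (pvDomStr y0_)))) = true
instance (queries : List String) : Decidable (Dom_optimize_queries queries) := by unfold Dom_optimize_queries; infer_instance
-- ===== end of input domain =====

-- B replaces A's defaultdict bucketing + ordered extend with a classifier and one
-- flat pass per fixed category; same return value, chosen for simplicity (not speed).

-- ===== PORT A =====
def optimize_queries (queries : List String) : List String :=
  let query_groups : PySem.Dict String (List String) :=
    queries.foldl (fun d query =>
      if PySem.Str.isIn "node_cpu_seconds_total" query then
        d.modify "cpu" [] (· ++ [query])
      else if PySem.Str.isIn "node_memory" query then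
        d.modify "memory" [] (· ++ [query])
      else if PySem.Str.isIn "node_filesystem" query then
        d.modify "filesystem" [] (· ++ [query])
      else if PySem.Str.isIn "node_network" query then
        d.modify "network" [] (· ++ [query])
      else
        d.modify "other" [] (· ++ [query])) PySem.Dict.empty
  let optimized_queries : List String := []
  let optimized_queries :=
    if query_groups.contains "cpu" then optimized_queries ++ query_groups.getD "cpu" []
    else optimized_queries
  let optimized_queries :=
    if query_groups.contains "memory" then optimized_queries ++ query_groups.getD "memory" []
    else optimized_queries
  let optimized_queries :=
    if query_groups.contains "filesystem" then optimized_queries ++ query_groups.getD "filesystem" []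
    else optimized_queries
  let optimized_queries :=
    if query_groups.contains "network" then optimized_queries ++ query_groups.getD "network" []
    else optimized_queries
  let optimized_queries :=
    if query_groups.contains "other" then optimized_queries ++ query_groups.getD "other" []
    else optimized_queries
  optimized_queries

-- ===== PORT B =====
def pvClassify (query : String) : String :=
  if PySem.Str.isIn "node_cpu_seconds_total" query then "cpu"
  else if PySem.Str.isIn "node_memory" query then "memory"
  else if PySem.Str.isIn "node_filesystem" query then "filesystem"
  else if PySem.Str.isIn "node_network" query then "network"
  else "other"

def pvCategoryOrder : List String := ["cpu", "memory", "filesystem", "network", "other"]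

def optimize_queries_alt (queries : List String) : List String :=
  pvCategoryOrder.flatMap (fun cat => queries.filter (fun q => pvClassify q == cat))

-- ===== PRECONDITION & SPEC =====
def Spec_optimize_queries (queries : List String) (out : List String) : Prop := out = optimize_queries_alt queries
instance (queries : List String) (out : List String) : Decidable (Spec_optimize_queries queries out) := by unfold Spec_optimize_queries; infer_instance

-- ===== CLAIM (what is proved, stated in full; the proofs are below) =====
def Claim_equal_optimize_queries : Prop := ∀ (queries : List String), Dom_optimize_queries queries → Spec_optimize_queries queries (optimize_queries queries)

-- ===== LEMMAS AND PROOFS =====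

-- A's branching bucket step is exactly 'modify at the classified key'.
theorem pvStep_eq :
    (fun (d : PySem.Dict String (List String)) query =>
      if PySem.Str.isIn "node_cpu_seconds_total" query then
        d.modify "cpu" [] (· ++ [query])
      else if PySem.Str.isIn "node_memory" query then
        d.modify "memory" [] (· ++ [query])
      else if PySem.Str.isIn "node_filesystem" query then
        d.modify "filesystem" [] (· ++ [query])
      else if PySem.Str.isIn "node_network" query then
        d.modify "network" [] (· ++ [query])
      else
        d.modify "other" [] (· ++ [query]))
    = fun d query => d.modify (pvClassify query) [] (· ++ [query]) := by
  funext d q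
  simp only [pvClassify]
  split_ifs <;> rfl

-- The bucket of category c after A's fold is B's filter pass for c.
theorem pvBucket_eq (queries : List String) (c : String) :
    ((queries.foldl (fun d query => d.modify (pvClassify query) [] (· ++ [query]))
        PySem.Dict.empty : PySem.Dict String (List String)).getD c [])
      = queries.filter (fun q => pvClassify q == c) := by
  have h := PySem.Dict.getD_foldl_modify_append
      (l := queries.map (fun q => (pvClassify q, q)))
      (d := (PySem.Dict.empty : PySem.Dict String (List String))) (c := c)
  rw [List.foldl_map] at h
  simp only [h, PySem.Dict.getD_empty, List.nil_append, List.filter_map, List.map_map]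
  simp [Function.comp_def]

-- 'if c in groups: extend' is unconditional append: a missing bucket is [].
theorem pvExtend_if (d : PySem.Dict String (List String)) (c : String) (acc : List String) :
    (if d.contains c then acc ++ d.getD c [] else acc) = acc ++ d.getD c [] := by
  by_cases h : d.contains c = true
  · simp [h]
  · simp [pysem, h]

-- ===== VERDICT (by name: the statement is the Claim_ definition above) =====
theorem optimize_queries_spec : Claim_equal_optimize_queries := by
  intro queries _
  unfold Spec_optimize_queries optimize_queries optimize_queries_alt pvCategoryOrder
  rw [pvStep_eq]
  simp only [pvExtend_if]
  simp only [pvBucket_eq, List.flatMap_cons, List.flatMap_nil, List.nil_append,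
    List.append_nil, List.append_assoc]
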